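-- pv_equiv track=rewrite | github.com/Aniket123cloud/hacktoberfestani-2k22 | find_subarray_of_equal_sum.py | funt
-- ===== SOURCE A (Python) =====
-- def funt(nums):
-- 	flag=False
-- 	for i in range(len(nums)-2):
-- 		temp=nums[i]+nums[i+1]
-- 		for j in range(i+1,len(nums)-1):
-- 			temp1=nums[j]+nums[j+1]
-- 			if temp==temp1:
-- 				flag=True
-- 				break
-- 	return flag
-- ===== SOURCE B (Python) =====
-- def funt(nums):
--     seen = set()
--     for i in range(len(nums) - 1):
--         s = nums[i] + nums[i + 1]
--         if s in seen:
--             return True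
--         seen.add(s)
--     return False
-- ===== Notes on version B (the rewrite author's own statement) =====
-- stated objective: faster
-- what changed: Replaces A's nested quadratic scan comparing every pair of adjacent-pair sums with a single pass that records each adjacent-pair sum in a set and returns True on the first repeat.
import Mathlib
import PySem

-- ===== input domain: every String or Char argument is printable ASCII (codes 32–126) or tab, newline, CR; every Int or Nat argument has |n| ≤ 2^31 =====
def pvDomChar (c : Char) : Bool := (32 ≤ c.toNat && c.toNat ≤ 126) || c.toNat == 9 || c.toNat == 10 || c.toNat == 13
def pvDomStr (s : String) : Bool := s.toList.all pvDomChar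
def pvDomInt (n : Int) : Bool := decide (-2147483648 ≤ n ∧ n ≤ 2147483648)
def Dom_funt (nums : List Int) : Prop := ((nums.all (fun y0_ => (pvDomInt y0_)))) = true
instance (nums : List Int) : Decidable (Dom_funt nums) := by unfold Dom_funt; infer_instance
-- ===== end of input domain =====

-- B replaces A's nested quadratic scan with a single pass over the adjacent-pair
-- sums that records each sum in a set and stops at the first repeat (objective: faster).

-- ===== PORT A =====
-- inner 'for j in range(i+1, len(nums)-1)' loop with its break
def funtInner (nums : List Int) (temp : Int) : List Int → Bool → Bool
  | [], flag => flag
  | j :: js, flag =>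
      let temp1 := PySem.List.pyGetD nums j 0 + PySem.List.pyGetD nums (j + 1) 0
      if temp = temp1 then true
      else funtInner nums temp js flag

def funt (nums : List Int) : Bool :=
  (PySem.List.pyRange 0 ((nums.length : Int) - 2) 1).foldl
    (fun flag i =>
      let temp := PySem.List.pyGetD nums i 0 + PySem.List.pyGetD nums (i + 1) 0
      funtInner nums temp (PySem.List.pyRange (i + 1) ((nums.length : Int) - 1) 1) flag)
    false

-- ===== PORT B =====
-- one pass over 'for i in range(len(nums)-1)' with the 'seen' set and early return
def funtScan (nums : List Int) (seen : PySem.Set Int) : List Int → Bool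
  | [] => false
  | i :: is =>
      let s := PySem.List.pyGetD nums i 0 + PySem.List.pyGetD nums (i + 1) 0
      if PySem.Set.contains seen s then true
      else funtScan nums (PySem.Set.add seen s) is

def funt_alt (nums : List Int) : Bool :=
  funtScan nums PySem.Set.empty (PySem.List.pyRange 0 ((nums.length : Int) - 1) 1)

-- ===== PRECONDITION & SPEC =====
def Spec_funt (nums : List Int) (out : Bool) : Prop := out = funt_alt nums
instance (nums : List Int) (out : Bool) : Decidable (Spec_funt nums out) := by unfold Spec_funt; infer_instance

-- ===== CLAIM (what is proved, stated in full; the proofs are below) =====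
def Claim_equal_funt : Prop := ∀ (nums : List Int), Dom_funt nums → Spec_funt nums (funt nums)

-- ===== LEMMAS AND PROOFS =====

-- the adjacent-pair sum at index i
def pairSum (nums : List Int) (i : Int) : Int :=
  PySem.List.pyGetD nums i 0 + PySem.List.pyGetD nums (i + 1) 0

theorem funtInner_eq_any (nums : List Int) (temp : Int) (js : List Int) (flag : Bool) :
    funtInner nums temp js flag = (flag || js.any (fun j => decide (temp = pairSum nums j))) := by
  induction js generalizing flag with
  | nil => simp [funtInner]
  | cons j js ih =>
      simp only [funtInner]
      by_cases h : temp = PySem.List.pyGetD nums j 0 + PySem.List.pyGetD nums (j + 1) 0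
      · simp [pairSum, h]
      · rw [if_neg h, ih]
        have hd : (decide (temp = pairSum nums j)) = false := by simp [pairSum, h]
        simp [hd]

theorem foldl_or (g : Int → Bool) (l : List Int) (b : Bool) :
    l.foldl (fun f i => (f || g i)) b = (b || l.any g) := by
  induction l generalizing b with
  | nil => simp
  | cons x xs ih => simp [List.foldl, ih, Bool.or_assoc]

theorem funt_eq_true_iff (nums : List Int) :
    funt nums = true ↔
      ∃ i j : Int, 0 ≤ i ∧ i < j ∧ j < (nums.length : Int) - 1 ∧
        pairSum nums i = pairSum nums j := by
  unfold funt
  have hfold :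
      (PySem.List.pyRange 0 ((nums.length : Int) - 2) 1).foldl
        (fun flag i =>
          let temp := PySem.List.pyGetD nums i 0 + PySem.List.pyGetD nums (i + 1) 0
          funtInner nums temp (PySem.List.pyRange (i + 1) ((nums.length : Int) - 1) 1) flag)
        false
      = (PySem.List.pyRange 0 ((nums.length : Int) - 2) 1).any
          (fun i => (PySem.List.pyRange (i + 1) ((nums.length : Int) - 1) 1).any
            (fun j => decide (pairSum nums i = pairSum nums j))) := by
    have : ∀ flag i,
        (let temp := PySem.List.pyGetD nums i 0 + PySem.List.pyGetD nums (i + 1) 0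
         funtInner nums temp (PySem.List.pyRange (i + 1) ((nums.length : Int) - 1) 1) flag)
        = (flag || (PySem.List.pyRange (i + 1) ((nums.length : Int) - 1) 1).any
            (fun j => decide (pairSum nums i = pairSum nums j))) := by
      intro flag i
      exact funtInner_eq_any nums (pairSum nums i) _ flag
    have hfun : (fun flag i =>
          let temp := PySem.List.pyGetD nums i 0 + PySem.List.pyGetD nums (i + 1) 0
          funtInner nums temp (PySem.List.pyRange (i + 1) ((nums.length : Int) - 1) 1) flag)
        = (fun flag i => (flag || (PySem.List.pyRange (i + 1) ((nums.length : Int) - 1) 1).any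
            (fun j => decide (pairSum nums i = pairSum nums j)))) := by
      funext flag i; exact this flag i
    rw [hfun, foldl_or]
    simp
  rw [hfold]
  simp only [List.any_eq_true, PySem.List.mem_pyRange_one, decide_eq_true_eq]
  constructor
  · rintro ⟨i, ⟨hi0, hi2⟩, j, ⟨hj1, hj2⟩, h⟩
    exact ⟨i, j, hi0, by omega, hj2, h⟩
  · rintro ⟨i, j, hi0, hij, hj, h⟩
    exact ⟨i, ⟨hi0, by omega⟩, j, ⟨by omega, hj⟩, h⟩

theorem funtScan_eq_true_iff (nums : List Int) (seen : PySem.Set Int) (is : List Int)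
    (hnd : seen.Nodup) :
    funtScan nums seen is = true ↔ ¬ (seen ++ is.map (pairSum nums)).Nodup := by
  induction is generalizing seen with
  | nil => simp [funtScan, hnd]
  | cons i is ih =>
      have hstep : funtScan nums seen (i :: is) =
          (if PySem.Set.contains seen (pairSum nums i) = true then true
           else funtScan nums (PySem.Set.add seen (pairSum nums i)) is) := rfl
      by_cases h : pairSum nums i ∈ seen
      · have hc : PySem.Set.contains seen (pairSum nums i) = true := by
          simpa [PySem.Set.contains] using h
        rw [hstep, if_pos hc]
        simp only [List.map_cons, true_iff]
        intro hnodup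
        exact (List.nodup_append.mp hnodup).2.2 _ h (pairSum nums i) (by simp) rfl
      · have hc : PySem.Set.contains seen (pairSum nums i) = false := by
          simpa [PySem.Set.contains] using h
        have hadd : PySem.Set.add seen (pairSum nums i) = seen ++ [pairSum nums i] := by
          unfold PySem.Set.add
          rw [hc]
          simp
        have hnd' : (PySem.Set.add seen (pairSum nums i)).Nodup := by
          rw [hadd, List.nodup_append]
          refine ⟨hnd, by simp, ?_⟩
          intro a ha b hb
          simp at hb
          subst hb
          exact fun hEq => h (hEq ▸ ha)
        rw [hstep, if_neg (by rw [hc]; exact Bool.false_ne_true), ih _ hnd', hadd]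
        simp [List.append_assoc]

theorem nodup_map_pyRange_iff (nums : List Int) (m : Int) :
    ¬ ((PySem.List.pyRange 0 m 1).map (pairSum nums)).Nodup ↔
      ∃ i j : Int, 0 ≤ i ∧ i < j ∧ j < m ∧ pairSum nums i = pairSum nums j := by
  rw [List.Nodup, List.pairwise_map, List.pairwise_iff_getElem]
  simp only [PySem.List.length_pyRange_one, PySem.List.getElem_pyRange_one]
  constructor
  · intro h
    push Not at h
    obtain ⟨a, b, ha, hb, hab, heq⟩ := h
    refine ⟨0 + (a : Int), 0 + (b : Int), by omega, by omega, by omega, by simpa using heq⟩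
  · rintro ⟨i, j, hi0, hij, hj, heq⟩ h
    have hiN : i.toNat < (m - 0).toNat := by omega
    have hjN : j.toNat < (m - 0).toNat := by omega
    have := h i.toNat j.toNat hiN hjN (by omega)
    apply this
    have h1 : (0 : Int) + (i.toNat : Int) = i := by omega
    have h2 : (0 : Int) + (j.toNat : Int) = j := by omega
    rw [h1, h2, heq]

theorem funt_alt_eq_true_iff (nums : List Int) :
    funt_alt nums = true ↔
      ∃ i j : Int, 0 ≤ i ∧ i < j ∧ j < (nums.length : Int) - 1 ∧
        pairSum nums i = pairSum nums j := by
  unfold funt_alt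
  rw [funtScan_eq_true_iff nums PySem.Set.empty _ (by simp [PySem.Set.empty])]
  have : (PySem.Set.empty ++ (PySem.List.pyRange 0 ((nums.length : Int) - 1) 1).map (pairSum nums))
       = (PySem.List.pyRange 0 ((nums.length : Int) - 1) 1).map (pairSum nums) := by
    simp [PySem.Set.empty]
  rw [this, nodup_map_pyRange_iff]

-- ===== VERDICT (by name: the statement is the Claim_ definition above) =====
theorem funt_spec : Claim_equal_funt := by
  intro nums _
  unfold Spec_funt
  rw [Bool.eq_iff_iff, funt_eq_true_iff, funt_alt_eq_true_iff]
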